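-- pv_equiv track=rewrite | github.com/Kaalaras/MV_combat_system | utils/character_utils.py | find_position_trait_in_dictionary
-- ===== SOURCE A (Python) =====
-- from typing import Union
--
-- BASE_TRAITS_TEMPLATE = {
--     'Attributes': {
--         'Physical': {'Strength': 1, 'Dexterity': 1, 'Stamina': 1},
--         'Social': {'Charisma': 1, 'Manipulation': 1, 'Appearance': 1},
--         'Mental': {'Perception': 1, 'Intelligence': 1, 'Wits': 1}
--     },
--     'Abilities': {
--         'Talents': {'Alertness': 0, 'Athletics': 0, 'Brawl': 0,
--                     'Empathy': 0, 'Expression': 0, 'Intimidation': 0,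
--                     'Intuition': 0, 'Leadership': 0, 'Streetwise': 0, 'Subterfuge': 0},
--         'Skills': {'Animal Ken': 0, 'Crafts': 0, 'Drive': 0,
--                    'Etiquette': 0, 'Firearms': 0, 'Larceny': 0,
--                    'Melee': 0, 'Performance': 0, 'Stealth': 0, 'Survival': 0},
--         'Knowledges': {'Academics': 0, 'Computer': 0, 'Finance': 0,
--                        'Investigation': 0, 'Law': 0, 'Medicine': 0,
--                        'Occult': 0, 'Politics': 0, 'Science': 0, 'Technology': 0}
--     },
--     'Disciplines': {
--         'Animalism': 0, 'Auspex': 0, 'Celerity': 0, 'Chimerstry': 0,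
--         'Dementation': 0, 'Dominate': 0, 'Fortitude': 0, 'Necromancy': 0,
--         'Obfuscate': 0, 'Obtenebration': 0, 'Potence': 0, 'Presence': 0,
--         'Protean': 0, 'Quietus': 0, 'Serpentis': 0, 'Thaumaturgy': 0,
--         'Vicissitude': 0, 'Valeren': 0
--     },
--     'Virtues': {'Conscience': 1, 'Self-Control': 1, 'Courage': 1},
--     'Willpower': 0,
--     'Backgrounds': {'Allies': 0, 'False Identity': 0, 'Contacts': 0,
--                     'Domain': 0, 'Fame': 0, 'Influence': 0, 'Herd': 0,
--                     'Resources': 0, 'Retainers': 0, 'Rituals': 0}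
-- }
--
-- def find_position_trait_in_dictionary(base_trait_name: str)->Union[list, None]:
--     """
--     Find the position of a trait in the BASE_TRAITS_TEMPLATE dictionary and return a list of keys to access it.
--     For instance, if the base_trait_name is 'Strength', the function will return ['Attributes', 'Physical', 'Strength'].
--     If the base_trait_name is "Academics", the function will return ['Abilities', 'Knowledges', 'Academics'].
--     If the base_trait_name is "Willpower", the function will return ['Willpower']. etc.
--     If the base_trait_name is not found, the function will return None.
--     :param base_trait_name: The name of the trait to find
--     :return: The position of the trait in the dictionary if it exists, None otherwise
--     """
--
--     def aux_find_position_trait_in_dictionary_rec(traits: dict, trait_name: str, keys: list)->Union[list, None]: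
--         for key, value in traits.items():
--             if isinstance(value, dict):
--                 keys.append(key)
--                 result = aux_find_position_trait_in_dictionary_rec(value, trait_name, keys)
--                 if result:
--                     return result
--                 keys.pop()
--             elif key == trait_name:
--                 keys.append(key)
--                 return keys
--         return None
--
--     return aux_find_position_trait_in_dictionary_rec(BASE_TRAITS_TEMPLATE, base_trait_name, [])
-- ===== SOURCE B (Python) =====
-- from typing import Union
--
-- # Table-driven re-implementation: the nested BASE_TRAITS_TEMPLATE is a fixed module
-- # constant, so the leaf-name -> key-path mapping is written out once as a flat table;
-- # each call is a single dict lookup returning a fresh copy of the stored path.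
-- _TRAIT_PATHS = {
--     'Strength': ['Attributes', 'Physical', 'Strength'],
--     'Dexterity': ['Attributes', 'Physical', 'Dexterity'],
--     'Stamina': ['Attributes', 'Physical', 'Stamina'],
--     'Charisma': ['Attributes', 'Social', 'Charisma'],
--     'Manipulation': ['Attributes', 'Social', 'Manipulation'],
--     'Appearance': ['Attributes', 'Social', 'Appearance'],
--     'Perception': ['Attributes', 'Mental', 'Perception'],
--     'Intelligence': ['Attributes', 'Mental', 'Intelligence'],
--     'Wits': ['Attributes', 'Mental', 'Wits'],
--     'Alertness': ['Abilities', 'Talents', 'Alertness'],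
--     'Athletics': ['Abilities', 'Talents', 'Athletics'],
--     'Brawl': ['Abilities', 'Talents', 'Brawl'],
--     'Empathy': ['Abilities', 'Talents', 'Empathy'],
--     'Expression': ['Abilities', 'Talents', 'Expression'],
--     'Intimidation': ['Abilities', 'Talents', 'Intimidation'],
--     'Intuition': ['Abilities', 'Talents', 'Intuition'],
--     'Leadership': ['Abilities', 'Talents', 'Leadership'],
--     'Streetwise': ['Abilities', 'Talents', 'Streetwise'],
--     'Subterfuge': ['Abilities', 'Talents', 'Subterfuge'],
--     'Animal Ken': ['Abilities', 'Skills', 'Animal Ken'],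
--     'Crafts': ['Abilities', 'Skills', 'Crafts'],
--     'Drive': ['Abilities', 'Skills', 'Drive'],
--     'Etiquette': ['Abilities', 'Skills', 'Etiquette'],
--     'Firearms': ['Abilities', 'Skills', 'Firearms'],
--     'Larceny': ['Abilities', 'Skills', 'Larceny'],
--     'Melee': ['Abilities', 'Skills', 'Melee'],
--     'Performance': ['Abilities', 'Skills', 'Performance'],
--     'Stealth': ['Abilities', 'Skills', 'Stealth'],
--     'Survival': ['Abilities', 'Skills', 'Survival'],
--     'Academics': ['Abilities', 'Knowledges', 'Academics'],
--     'Computer': ['Abilities', 'Knowledges', 'Computer'],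
--     'Finance': ['Abilities', 'Knowledges', 'Finance'],
--     'Investigation': ['Abilities', 'Knowledges', 'Investigation'],
--     'Law': ['Abilities', 'Knowledges', 'Law'],
--     'Medicine': ['Abilities', 'Knowledges', 'Medicine'],
--     'Occult': ['Abilities', 'Knowledges', 'Occult'],
--     'Politics': ['Abilities', 'Knowledges', 'Politics'],
--     'Science': ['Abilities', 'Knowledges', 'Science'],
--     'Technology': ['Abilities', 'Knowledges', 'Technology'],
--     'Animalism': ['Disciplines', 'Animalism'],
--     'Auspex': ['Disciplines', 'Auspex'],
--     'Celerity': ['Disciplines', 'Celerity'],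
--     'Chimerstry': ['Disciplines', 'Chimerstry'],
--     'Dementation': ['Disciplines', 'Dementation'],
--     'Dominate': ['Disciplines', 'Dominate'],
--     'Fortitude': ['Disciplines', 'Fortitude'],
--     'Necromancy': ['Disciplines', 'Necromancy'],
--     'Obfuscate': ['Disciplines', 'Obfuscate'],
--     'Obtenebration': ['Disciplines', 'Obtenebration'],
--     'Potence': ['Disciplines', 'Potence'],
--     'Presence': ['Disciplines', 'Presence'],
--     'Protean': ['Disciplines', 'Protean'],
--     'Quietus': ['Disciplines', 'Quietus'],
--     'Serpentis': ['Disciplines', 'Serpentis'],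
--     'Thaumaturgy': ['Disciplines', 'Thaumaturgy'],
--     'Vicissitude': ['Disciplines', 'Vicissitude'],
--     'Valeren': ['Disciplines', 'Valeren'],
--     'Conscience': ['Virtues', 'Conscience'],
--     'Self-Control': ['Virtues', 'Self-Control'],
--     'Courage': ['Virtues', 'Courage'],
--     'Willpower': ['Willpower'],
--     'Allies': ['Backgrounds', 'Allies'],
--     'False Identity': ['Backgrounds', 'False Identity'],
--     'Contacts': ['Backgrounds', 'Contacts'],
--     'Domain': ['Backgrounds', 'Domain'],
--     'Fame': ['Backgrounds', 'Fame'],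
--     'Influence': ['Backgrounds', 'Influence'],
--     'Herd': ['Backgrounds', 'Herd'],
--     'Resources': ['Backgrounds', 'Resources'],
--     'Retainers': ['Backgrounds', 'Retainers'],
--     'Rituals': ['Backgrounds', 'Rituals'],
-- }
--
--
-- def find_position_trait_in_dictionary(base_trait_name: str) -> Union[list, None]:
--     path = _TRAIT_PATHS.get(base_trait_name)
--     return list(path) if path is not None else None
-- ===== Notes on version B (the rewrite author's own statement) =====
-- stated objective: faster
-- what changed: Replaces the per-call depth-first search of the nested template (mutating a shared keys list) by a flat literal leaf-name-to-key-path table, so each call is a single dict lookup returning a fresh copy of the stored path.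
import Mathlib
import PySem

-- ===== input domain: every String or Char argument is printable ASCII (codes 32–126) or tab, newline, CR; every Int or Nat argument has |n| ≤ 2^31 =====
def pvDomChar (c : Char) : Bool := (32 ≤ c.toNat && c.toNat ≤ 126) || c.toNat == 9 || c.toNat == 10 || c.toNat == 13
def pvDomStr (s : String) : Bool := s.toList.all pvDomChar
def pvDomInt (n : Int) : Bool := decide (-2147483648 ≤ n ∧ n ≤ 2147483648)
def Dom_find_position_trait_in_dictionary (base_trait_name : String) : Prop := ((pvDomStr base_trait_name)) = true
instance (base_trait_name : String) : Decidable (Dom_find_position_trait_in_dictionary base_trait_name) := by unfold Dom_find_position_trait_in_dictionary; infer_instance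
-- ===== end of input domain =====

-- B replaces A's per-call depth-first search of the nested template (with a shared mutated
-- keys list) by a flat literal leaf-name → key-path table queried by one dict lookup (objective: faster per call).

-- ===== PORT A =====
-- BASE_TRAITS_TEMPLATE is a nested dict of str → (dict | int); modelled by the mutual pair TVal/TDict
-- (TDict keeps the Python dict's insertion order; leaf values are ints).
mutual
inductive TVal : Type
  | vint : Int → TVal
  | vdict : TDict → TVal
inductive TDict : Type
  | nil : TDict
  | cons : String → TVal → TDict → TDict
end

def pvTemplate : TDict :=
  (TDict.cons "Attributes" (TVal.vdict (TDict.cons "Physical" (TVal.vdict (TDict.cons "Strength" (TVal.vint 1) (TDict.cons "Dexterity" (TVal.vint 1) (TDict.cons "Stamina" (TVal.vint 1) TDict.nil)))) (TDict.cons "Social" (TVal.vdict (TDict.cons "Charisma" (TVal.vint 1) (TDict.cons "Manipulation" (TVal.vint 1) (TDict.cons "Appearance" (TVal.vint 1) TDict.nil)))) (TDict.cons "Mental" (TVal.vdict (TDict.cons "Perception" (TVal.vint 1) (TDict.cons "Intelligence" (TVal.vint 1) (TDict.cons "Wits" (TVal.vint 1) TDict.nil)))) TDict.nil)))) (TDict.cons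 "Abilities" (TVal.vdict (TDict.cons "Talents" (TVal.vdict (TDict.cons "Alertness" (TVal.vint 0) (TDict.cons "Athletics" (TVal.vint 0) (TDict.cons "Brawl" (TVal.vint 0) (TDict.cons "Empathy" (TVal.vint 0) (TDict.cons "Expression" (TVal.vint 0) (TDict.cons "Intimidation" (TVal.vint 0) (TDict.cons "Intuition" (TVal.vint 0) (TDict.cons "Leadership" (TVal.vint 0) (TDict.cons "Streetwise" (TVal.vint 0) (TDict.cons "Subterfuge" (TVal.vint 0) TDict.nil))))))))))) (TDict.cons "Skills" (TVal.vdict (TDict.cons "Animal Ken" (TVal.vint 0) (TDict.cons "Crafts" (TVal.vint 0) (TDict.cons "Drive" (TVal.vint 0) (TDict.cons "Etiquette" (TVal.vint 0) (TDict.cons "Firearms" (TVal.vint 0) (TDict.cons "Larceny" (TVal.vint 0) (TDict.cons "Melee" (TVal.vint 0) (TDict.cons "Performance" (TVal.vint 0) (TDict.cons "Stealth" (TVal.vint 0) (TDict.cons "Survival" (TVal.vint 0) TDict.nil))))))))))) (TDict.cons "Knowledges" (TVal.vdict (TDict.cons "Academics" (TVal.vint 0) (TDict.cons "Computer" (TVal.vint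 0) (TDict.cons "Finance" (TVal.vint 0) (TDict.cons "Investigation" (TVal.vint 0) (TDict.cons "Law" (TVal.vint 0) (TDict.cons "Medicine" (TVal.vint 0) (TDict.cons "Occult" (TVal.vint 0) (TDict.cons "Politics" (TVal.vint 0) (TDict.cons "Science" (TVal.vint 0) (TDict.cons "Technology" (TVal.vint 0) TDict.nil))))))))))) TDict.nil)))) (TDict.cons "Disciplines" (TVal.vdict (TDict.cons "Animalism" (TVal.vint 0) (TDict.cons "Auspex" (TVal.vint 0) (TDict.cons "Celerity" (TVal.vint 0) (TDict.cons "Chimerstry" (TVal.vint 0) (TDict.cons "Dementation" (TVal.vint 0) (TDict.cons "Dominate" (TVal.vint 0) (TDict.cons "Fortitude" (TVal.vint 0) (TDict.cons "Necromancy" (TVal.vint 0) (TDict.cons "Obfuscate" (TVal.vint 0) (TDict.cons "Obtenebration" (TVal.vint 0) (TDict.cons "Potence" (TVal.vint 0) (TDict.cons "Presence" (TVal.vint 0) (TDict.cons "Protean" (TVal.vint 0) (TDict.cons "Quietus" (TVal.vint 0) (TDict.cons "Serpentis" (TVal.vint 0) (TDict.cons "Thaumaturgy" (TVal.vint 0)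 (TDict.cons "Vicissitude" (TVal.vint 0) (TDict.cons "Valeren" (TVal.vint 0) TDict.nil))))))))))))))))))) (TDict.cons "Virtues" (TVal.vdict (TDict.cons "Conscience" (TVal.vint 1) (TDict.cons "Self-Control" (TVal.vint 1) (TDict.cons "Courage" (TVal.vint 1) TDict.nil)))) (TDict.cons "Willpower" (TVal.vint 0) (TDict.cons "Backgrounds" (TVal.vdict (TDict.cons "Allies" (TVal.vint 0) (TDict.cons "False Identity" (TVal.vint 0) (TDict.cons "Contacts" (TVal.vint 0) (TDict.cons "Domain" (TVal.vint 0) (TDict.cons "Fame" (TVal.vint 0) (TDict.cons "Influence" (TVal.vint 0) (TDict.cons "Herd" (TVal.vint 0) (TDict.cons "Resources" (TVal.vint 0) (TDict.cons "Retainers" (TVal.vint 0) (TDict.cons "Rituals" (TVal.vint 0) TDict.nil))))))))))) TDict.nil))))))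

-- aux_find_position_trait_in_dictionary_rec: the for-loop over traits.items() with the shared
-- 'keys' list modelled functionally (keys.append k; recurse; pop on failure  ≡  recurse with keys ++ [k]).
-- The Python truthiness test 'if result:' is 'isSome' here: a returned list is always non-empty.
mutual
def pvAuxRecD (trait_name : String) (keys : List String) : TDict → Option (List String)
  | TDict.nil => none
  | TDict.cons key value rest =>
    match pvAuxRecV trait_name keys key value with
    | some r => some r
    | none => pvAuxRecD trait_name keys rest
def pvAuxRecV (trait_name : String) (keys : List String) (key : String) : TVal → Option (List String)
  | TVal.vdict d => pvAuxRecD trait_name (keys ++ [key]) d   -- isinstance(value, dict) branch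
  | TVal.vint _ => if key == trait_name then some (keys ++ [key]) else none
end

def find_position_trait_in_dictionary (base_trait_name : String) : Option (List String) :=
  pvAuxRecD base_trait_name [] pvTemplate

-- ===== PORT B =====
-- _TRAIT_PATHS: the flat literal table from Source B, in its insertion order; its .get is
-- first-match List.lookup (exact: the keys are pairwise distinct).
def pvTraitPaths : List (String × List String) :=
  [("Strength", ["Attributes", "Physical", "Strength"]),
   ("Dexterity", ["Attributes", "Physical", "Dexterity"]),
   ("Stamina", ["Attributes", "Physical", "Stamina"]),
   ("Charisma", ["Attributes", "Social", "Charisma"]),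
   ("Manipulation", ["Attributes", "Social", "Manipulation"]),
   ("Appearance", ["Attributes", "Social", "Appearance"]),
   ("Perception", ["Attributes", "Mental", "Perception"]),
   ("Intelligence", ["Attributes", "Mental", "Intelligence"]),
   ("Wits", ["Attributes", "Mental", "Wits"]),
   ("Alertness", ["Abilities", "Talents", "Alertness"]),
   ("Athletics", ["Abilities", "Talents", "Athletics"]),
   ("Brawl", ["Abilities", "Talents", "Brawl"]),
   ("Empathy", ["Abilities", "Talents", "Empathy"]),
   ("Expression", ["Abilities", "Talents", "Expression"]),
   ("Intimidation", ["Abilities", "Talents", "Intimidation"]),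
   ("Intuition", ["Abilities", "Talents", "Intuition"]),
   ("Leadership", ["Abilities", "Talents", "Leadership"]),
   ("Streetwise", ["Abilities", "Talents", "Streetwise"]),
   ("Subterfuge", ["Abilities", "Talents", "Subterfuge"]),
   ("Animal Ken", ["Abilities", "Skills", "Animal Ken"]),
   ("Crafts", ["Abilities", "Skills", "Crafts"]),
   ("Drive", ["Abilities", "Skills", "Drive"]),
   ("Etiquette", ["Abilities", "Skills", "Etiquette"]),
   ("Firearms", ["Abilities", "Skills", "Firearms"]),
   ("Larceny", ["Abilities", "Skills", "Larceny"]),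
   ("Melee", ["Abilities", "Skills", "Melee"]),
   ("Performance", ["Abilities", "Skills", "Performance"]),
   ("Stealth", ["Abilities", "Skills", "Stealth"]),
   ("Survival", ["Abilities", "Skills", "Survival"]),
   ("Academics", ["Abilities", "Knowledges", "Academics"]),
   ("Computer", ["Abilities", "Knowledges", "Computer"]),
   ("Finance", ["Abilities", "Knowledges", "Finance"]),
   ("Investigation", ["Abilities", "Knowledges", "Investigation"]),
   ("Law", ["Abilities", "Knowledges", "Law"]),
   ("Medicine", ["Abilities", "Knowledges", "Medicine"]),
   ("Occult", ["Abilities", "Knowledges", "Occult"]),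
   ("Politics", ["Abilities", "Knowledges", "Politics"]),
   ("Science", ["Abilities", "Knowledges", "Science"]),
   ("Technology", ["Abilities", "Knowledges", "Technology"]),
   ("Animalism", ["Disciplines", "Animalism"]),
   ("Auspex", ["Disciplines", "Auspex"]),
   ("Celerity", ["Disciplines", "Celerity"]),
   ("Chimerstry", ["Disciplines", "Chimerstry"]),
   ("Dementation", ["Disciplines", "Dementation"]),
   ("Dominate", ["Disciplines", "Dominate"]),
   ("Fortitude", ["Disciplines", "Fortitude"]),
   ("Necromancy", ["Disciplines", "Necromancy"]),
   ("Obfuscate", ["Disciplines", "Obfuscate"]),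
   ("Obtenebration", ["Disciplines", "Obtenebration"]),
   ("Potence", ["Disciplines", "Potence"]),
   ("Presence", ["Disciplines", "Presence"]),
   ("Protean", ["Disciplines", "Protean"]),
   ("Quietus", ["Disciplines", "Quietus"]),
   ("Serpentis", ["Disciplines", "Serpentis"]),
   ("Thaumaturgy", ["Disciplines", "Thaumaturgy"]),
   ("Vicissitude", ["Disciplines", "Vicissitude"]),
   ("Valeren", ["Disciplines", "Valeren"]),
   ("Conscience", ["Virtues", "Conscience"]),
   ("Self-Control", ["Virtues", "Self-Control"]),
   ("Courage", ["Virtues", "Courage"]),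
   ("Willpower", ["Willpower"]),
   ("Allies", ["Backgrounds", "Allies"]),
   ("False Identity", ["Backgrounds", "False Identity"]),
   ("Contacts", ["Backgrounds", "Contacts"]),
   ("Domain", ["Backgrounds", "Domain"]),
   ("Fame", ["Backgrounds", "Fame"]),
   ("Influence", ["Backgrounds", "Influence"]),
   ("Herd", ["Backgrounds", "Herd"]),
   ("Resources", ["Backgrounds", "Resources"]),
   ("Retainers", ["Backgrounds", "Retainers"]),
   ("Rituals", ["Backgrounds", "Rituals"])]

def find_position_trait_in_dictionary_alt (base_trait_name : String) : Option (List String) :=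
  pvTraitPaths.lookup base_trait_name   -- list(path) copy is identity on values

-- ===== PRECONDITION & SPEC =====
def Spec_find_position_trait_in_dictionary (base_trait_name : String) (out : Option (List String)) : Prop := out = find_position_trait_in_dictionary_alt base_trait_name
instance (base_trait_name : String) (out : Option (List String)) : Decidable (Spec_find_position_trait_in_dictionary base_trait_name out) := by unfold Spec_find_position_trait_in_dictionary; infer_instance

-- ===== CLAIM =====
def Claim_equal_find_position_trait_in_dictionary : Prop := ∀ (base_trait_name : String), Dom_find_position_trait_in_dictionary base_trait_name → Spec_find_position_trait_in_dictionary base_trait_name (find_position_trait_in_dictionary base_trait_name)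

-- ===== LEMMAS AND PROOFS =====
-- Proof-only flattening of the nested template (mirrors neither port's code path;
-- used to characterise A's DFS as a lookup in the flat list it induces).
mutual
def pvFlattenD (path : List String) : TDict → List (String × List String)
  | TDict.nil => []
  | TDict.cons key value rest => pvFlattenV path key value ++ pvFlattenD path rest
def pvFlattenV (path : List String) (key : String) : TVal → List (String × List String)
  | TVal.vdict d => pvFlattenD (path ++ [key]) d
  | TVal.vint _ => [(key, path ++ [key])]
end

theorem pv_lookup_append {α β : Type} [BEq α] (a : α) (l₁ l₂ : List (α × β)) :
    (l₁ ++ l₂).lookup a = ((l₁.lookup a).or (l₂.lookup a)) := by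
  induction l₁ with
  | nil => simp [List.lookup]
  | cons hd tl ih =>
    cases hd with
    | mk k v =>
      by_cases h : a == k
      · simp [List.lookup, h]
      · simp [List.lookup, h, ih]

-- DFS with accumulator 'keys' returns exactly the first-match lookup in the flattened template.
mutual
theorem pv_auxD_eq (trait : String) (keys : List String) (d : TDict) :
    pvAuxRecD trait keys d = (pvFlattenD keys d).lookup trait := by
  cases d with
  | nil => simp [pvAuxRecD, pvFlattenD]
  | cons key value rest =>
    rw [pvAuxRecD, pvFlattenD, pv_lookup_append, pv_auxV_eq trait keys key value,
        pv_auxD_eq trait keys rest]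
    cases (pvFlattenV keys key value).lookup trait <;> simp [Option.or]
theorem pv_auxV_eq (trait : String) (keys : List String) (key : String) (v : TVal) :
    pvAuxRecV trait keys key v = (pvFlattenV keys key v).lookup trait := by
  cases v with
  | vdict d => rw [pvAuxRecV, pvFlattenV]; exact pv_auxD_eq trait (keys ++ [key]) d
  | vint n =>
    rw [pvAuxRecV, pvFlattenV]
    by_cases h : key == trait
    · have h' : trait == key := by
        simp only [beq_iff_eq] at h ⊢; exact h.symm
      simp [List.lookup, h, h']
    · have h' : ¬ (trait == key) := by
        simp only [beq_iff_eq] at h ⊢; exact fun e => h e.symm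
      simp [List.lookup, h, h']
end

-- The literal table in B is exactly the flattening of the nested template.
theorem pv_table_eq_flatten : pvTraitPaths = pvFlattenD [] pvTemplate := by
  decide

-- ===== VERDICT =====
theorem find_position_trait_in_dictionary_spec : Claim_equal_find_position_trait_in_dictionary := by
  intro name _
  unfold Spec_find_position_trait_in_dictionary
  unfold find_position_trait_in_dictionary find_position_trait_in_dictionary_alt
  rw [pv_table_eq_flatten]
  exact pv_auxD_eq name [] pvTemplate
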